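-- pv_equiv track=rewrite | github.com/deesatzed/newragcity | ersatz_rag/regulus/backend/app/transparency/compliance_reporting.py | _prioritize_risk_mitigation
-- ===== SOURCE A (Python) =====
-- from typing import Dict, List, Any, Optional, Tuple, Union
--
-- def _prioritize_risk_mitigation(risk_categories: Dict[str, List[str]]) -> List[str]:
--     """Prioritize risk mitigation efforts"""
--     priority_list = []
--
--     # Sort categories by highest risk level
--     sorted_categories = sorted(
--         risk_categories.items(),
--         key=lambda x: max([{"critical": 4, "high": 3, "medium": 2, "low": 1}.get(level, 0) for level in x[1]]),
--         reverse=True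
--     )
--
--     for category, levels in sorted_categories[:5]:  # Top 5 priorities
--         max_level = max(levels, key=lambda x: {"critical": 4, "high": 3, "medium": 2, "low": 1}.get(x, 0))
--         priority_list.append(f"{category} ({max_level} priority)")
--
--     return priority_list
-- ===== SOURCE B (Python) =====
-- def _prioritize_risk_mitigation(risk_categories):
--     """Prioritize risk mitigation efforts (bucket selection instead of a full sort)."""
--     RANK = {"critical": 4, "high": 3, "medium": 2, "low": 1}
--     buckets = [[], [], [], [], []]  # index = severity score 0..4
--     for category, levels in risk_categories.items():
--         best = levels[0]
--         best_score = RANK.get(best, 0)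
--         for level in levels[1:]:
--             score = RANK.get(level, 0)
--             if best_score < score:
--                 best, best_score = level, score
--         buckets[best_score].append(f"{category} ({best} priority)")
--     out = []
--     for bucket in reversed(buckets):
--         out += bucket
--     return out[:5]
-- ===== Notes on version B (the rewrite author's own statement) =====
-- stated objective: faster
-- what changed: Replaces the comparison sort over all categories by a single pass that drops each category into one of five severity buckets (scores 0-4) and concatenates the buckets from highest to lowest, computing each category's best level once in that same pass.
import Mathlib
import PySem

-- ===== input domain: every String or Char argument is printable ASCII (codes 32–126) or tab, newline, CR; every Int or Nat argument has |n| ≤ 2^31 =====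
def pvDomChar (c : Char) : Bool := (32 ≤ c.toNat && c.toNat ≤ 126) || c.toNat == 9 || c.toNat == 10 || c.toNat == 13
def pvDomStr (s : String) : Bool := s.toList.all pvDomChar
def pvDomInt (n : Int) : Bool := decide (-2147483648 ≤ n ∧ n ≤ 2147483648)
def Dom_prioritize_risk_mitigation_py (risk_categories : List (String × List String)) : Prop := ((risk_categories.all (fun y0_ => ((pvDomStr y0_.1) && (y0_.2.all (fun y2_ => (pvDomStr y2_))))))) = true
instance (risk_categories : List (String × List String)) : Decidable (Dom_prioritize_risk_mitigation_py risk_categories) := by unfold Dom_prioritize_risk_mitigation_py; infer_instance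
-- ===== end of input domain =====

-- B replaces A's full comparison sort by a one-pass bucket selection over the five severity
-- scores; equivalence is proved for inputs whose level lists are all nonempty (elsewhere A raises).

-- ===== PORT A =====
-- {"critical": 4, "high": 3, "medium": 2, "low": 1}.get(level, 0)
def rankA (level : String) : Int :=
  PySem.Dict.getD (PySem.Dict.mk [("critical", (4 : Int)), ("high", 3), ("medium", 2), ("low", 1)]) level 0

-- sort key: max([… for level in x[1]]); .getD 0 is unreachable under Pre_ (Python max raises on [])
def keyA (x : String × List String) : Int :=
  (PySem.List.max? (x.2.map rankA) (fun y => y)).getD 0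

def prioritize_risk_mitigation_py (risk_categories : List (String × List String)) : List String :=
  let sorted_categories := PySem.List.sorted risk_categories keyA true
  -- for category, levels in sorted_categories[:5]: priority_list.append(...)
  (PySem.List.slice sorted_categories none (some 5)).foldl
    (fun priority_list p =>
      -- max(levels, key=…): first extremal element; .getD "" unreachable under Pre_
      let max_level := (PySem.List.max? p.2 rankA).getD ""
      priority_list ++ [p.1 ++ " (" ++ max_level ++ " priority)"]) []

-- ===== PORT B =====
def rankB (level : String) : Int :=
  PySem.Dict.getD (PySem.Dict.mk [("critical", (4 : Int)), ("high", 3), ("medium", 2), ("low", 1)]) level 0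

-- best = levels[0]; running strict-greater update over levels[1:]; ("", 0) unreachable under Pre_
def bestB (levels : List String) : String × Int :=
  match levels with
  | [] => ("", 0)
  | l :: t => t.foldl (fun b lv => if b.2 < rankB lv then (lv, rankB lv) else b) (l, rankB l)

def prioritize_risk_mitigation_py_alt (risk_categories : List (String × List String)) : List String :=
  let buckets := risk_categories.foldl
    (fun bs p =>
      let best := bestB p.2
      bs.modify best.2.toNat (fun b => b ++ [p.1 ++ " (" ++ best.1 ++ " priority)"]))
    [[], [], [], [], []]
  ((buckets.reverse).foldl (fun out b => out ++ b) []).take 5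

-- ===== PRECONDITION & SPEC =====
-- Pre_ excludes exactly the inputs with an empty level list, where Python A raises ValueError
-- (max() of an empty sequence) and Python B raises IndexError (levels[0]).
def Pre_prioritize_risk_mitigation_py (risk_categories : List (String × List String)) : Prop :=
  ∀ p ∈ risk_categories, p.2 ≠ []
instance (risk_categories : List (String × List String)) : Decidable (Pre_prioritize_risk_mitigation_py risk_categories) := by unfold Pre_prioritize_risk_mitigation_py; infer_instance

def pvWitness_prioritize_risk_mitigation_py : (List (String × List String)) :=
  [("network", ["high", "low"]), ("app", ["bogus"]), ("db", ["medium", "critical", "critical"])]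

def Spec_prioritize_risk_mitigation_py (risk_categories : List (String × List String)) (out : List String) : Prop := out = prioritize_risk_mitigation_py_alt risk_categories
instance (risk_categories : List (String × List String)) (out : List String) : Decidable (Spec_prioritize_risk_mitigation_py risk_categories out) := by unfold Spec_prioritize_risk_mitigation_py; infer_instance

-- ===== CLAIM (what is proved, stated in full; the proofs are below) =====
def Claim_equal_prioritize_risk_mitigation_py : Prop := ∀ (risk_categories : List (String × List String)), Dom_prioritize_risk_mitigation_py risk_categories → Pre_prioritize_risk_mitigation_py risk_categories → Spec_prioritize_risk_mitigation_py risk_categories (prioritize_risk_mitigation_py risk_categories)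

-- ===== LEMMAS AND PROOFS =====

theorem rankB_eq_rankA (s : String) : rankB s = rankA s := rfl

theorem rank_bound (s : String) : 0 ≤ rankA s ∧ rankA s ≤ 4 := by
  simp only [rankA, PySem.Dict.getD, PySem.Dict.get?, List.find?]
  cases "critical" == s <;> cases "high" == s <;> cases "medium" == s <;> cases "low" == s <;> simp

-- the running maximum of A's max(levels, key=…), first extremal element
def maxFold (t : List String) (l : String) : String :=
  t.foldl (fun m x => if rankA m < rankA x then x else m) l

theorem max?_cons_eq (t : List String) (l : String) :
    PySem.List.max? (l :: t) rankA = some (maxFold t l) := by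
  show List.foldl _ (some l) t = _
  induction t generalizing l with
  | nil => rfl
  | cons x t ih =>
    simp only [maxFold, List.foldl_cons]
    rw [show (if rankA l < rankA x then some x else some l)
          = some (if rankA l < rankA x then x else l) from (apply_ite some _ _ _).symm]
    exact ih _

theorem max?_map_eq (t : List String) (l : String) :
    PySem.List.max? ((l :: t).map rankA) (fun y => y) = some (rankA (maxFold t l)) := by
  show List.foldl _ (some (rankA l)) (t.map rankA) = _
  induction t generalizing l with
  | nil => rfl
  | cons x t ih =>
    simp only [maxFold, List.map_cons, List.foldl_cons]
    rw [show (if rankA l < rankA x then some (rankA x) else some (rankA l))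
          = some (rankA (if rankA l < rankA x then x else l)) by split <;> rfl]
    exact ih _

theorem bestB_eq (t : List String) (l : String) :
    bestB (l :: t) = (maxFold t l, rankA (maxFold t l)) := by
  show List.foldl _ (l, rankB l) t = _
  induction t generalizing l with
  | nil => rfl
  | cons x t ih =>
    simp only [maxFold, List.foldl_cons, rankB_eq_rankA]
    rw [show (if rankA l < rankA x then (x, rankA x) else (l, rankA l))
          = ((if rankA l < rankA x then x else l),
             rankA (if rankA l < rankA x then x else l)) by split <;> rfl]
    exact ih _

theorem keyA_eq (l : String) (t : List String) (c : String) :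
    keyA (c, l :: t) = rankA (maxFold t l) := by
  show (PySem.List.max? ((l :: t).map rankA) (fun y => y)).getD 0 = rankA (maxFold t l)
  rw [max?_map_eq]; rfl

theorem keyA_bound (p : String × List String) : 0 ≤ keyA p ∧ keyA p ≤ 4 := by
  obtain ⟨c, levels⟩ := p
  cases levels with
  | nil => simp [keyA, PySem.List.max?]
  | cons l t => rw [keyA_eq]; exact rank_bound _

-- the string A appends for a category
def fmt (p : String × List String) : String :=
  p.1 ++ " (" ++ (PySem.List.max? p.2 rankA).getD "" ++ " priority)"

-- the categories of score s, in input order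
def Fs (s : Int) (rc : List (String × List String)) : List (String × List String) :=
  rc.filter (fun p => decide (keyA p = s))

def catF (rc : List (String × List String)) : List (String × List String) :=
  Fs 4 rc ++ Fs 3 rc ++ Fs 2 rc ++ Fs 1 rc ++ Fs 0 rc

theorem mem_Fs {s : Int} {rc : List (String × List String)} {y : String × List String}
    (h : y ∈ Fs s rc) : keyA y = s := by
  rw [Fs] at h
  simpa using (List.mem_filter.mp h).2

theorem insertBy_append_not {α : Type} (before : α → α → Bool) (x : α) (A B : List α)
    (h : ∀ y ∈ A, before x y = false) :
    PySem.List.insertBy before x (A ++ B) = A ++ PySem.List.insertBy before x B := by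
  induction A with
  | nil => simp
  | cons a A ih =>
    have ha := h a (by simp)
    simp only [List.cons_append, PySem.List.insertBy, ha, Bool.false_eq_true, if_false]
    rw [ih (fun y hy => h y (by simp [hy]))]

theorem insertBy_all_before {α : Type} (before : α → α → Bool) (x : α) (B : List α)
    (h : ∀ y ∈ B, before x y = true) :
    PySem.List.insertBy before x B = x :: B := by
  cases B with
  | nil => rfl
  | cons y ys => simp [PySem.List.insertBy, h y (by simp)]

theorem ins_mid (x : String × List String) (A B : List (String × List String))
    (hA : ∀ y ∈ A, ¬ keyA y < keyA x) (hB : ∀ y ∈ B, keyA y < keyA x) :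
    PySem.List.insertBy (fun a b => decide (keyA b < keyA a)) x (A ++ B) = A ++ x :: B := by
  rw [insertBy_append_not _ _ _ _ (fun y hy => by simpa using hA y hy),
      insertBy_all_before _ _ _ (fun y hy => by simpa using hB y hy)]

theorem Fs_append_one (s : Int) (rc : List (String × List String)) (x : String × List String) :
    Fs s (rc ++ [x]) = Fs s rc ++ if keyA x = s then [x] else [] := by
  simp only [Fs, List.filter_append, List.filter_cons, List.filter_nil]
  split <;> simp_all

theorem ins_catF (rc : List (String × List String)) (x : String × List String) :
    PySem.List.insertBy (fun a b => decide (keyA b < keyA a)) x (catF rc) = catF (rc ++ [x]) := by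
  have hb := keyA_bound x
  have hk : keyA x = 4 ∨ keyA x = 3 ∨ keyA x = 2 ∨ keyA x = 1 ∨ keyA x = 0 := by omega
  rcases hk with hk | hk | hk | hk | hk
  · rw [show catF rc = Fs 4 rc ++ (Fs 3 rc ++ (Fs 2 rc ++ (Fs 1 rc ++ Fs 0 rc))) by
        simp [catF]]
    rw [ins_mid x _ _
        (fun y hy => by have := mem_Fs hy; omega)
        (fun y hy => by
          simp only [List.mem_append] at hy
          rcases hy with hy | hy | hy | hy <;> (have := mem_Fs hy; omega))]
    simp [catF, Fs_append_one, hk]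
  · rw [show catF rc = (Fs 4 rc ++ Fs 3 rc) ++ (Fs 2 rc ++ (Fs 1 rc ++ Fs 0 rc)) by
        simp [catF]]
    rw [ins_mid x _ _
        (fun y hy => by
          simp only [List.mem_append] at hy
          rcases hy with hy | hy <;> (have := mem_Fs hy; omega))
        (fun y hy => by
          simp only [List.mem_append] at hy
          rcases hy with hy | hy | hy <;> (have := mem_Fs hy; omega))]
    simp [catF, Fs_append_one, hk]
  · rw [show catF rc = (Fs 4 rc ++ (Fs 3 rc ++ Fs 2 rc)) ++ (Fs 1 rc ++ Fs 0 rc) by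
        simp [catF]]
    rw [ins_mid x _ _
        (fun y hy => by
          simp only [List.mem_append] at hy
          rcases hy with hy | hy | hy <;> (have := mem_Fs hy; omega))
        (fun y hy => by
          simp only [List.mem_append] at hy
          rcases hy with hy | hy <;> (have := mem_Fs hy; omega))]
    simp [catF, Fs_append_one, hk]
  · rw [show catF rc = (Fs 4 rc ++ (Fs 3 rc ++ (Fs 2 rc ++ Fs 1 rc))) ++ Fs 0 rc by
        simp [catF]]
    rw [ins_mid x _ _
        (fun y hy => by
          simp only [List.mem_append] at hy
          rcases hy with hy | hy | hy | hy <;> (have := mem_Fs hy; omega))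
        (fun y hy => by have := mem_Fs hy; omega)]
    simp [catF, Fs_append_one, hk]
  · rw [show catF rc = (Fs 4 rc ++ (Fs 3 rc ++ (Fs 2 rc ++ (Fs 1 rc ++ Fs 0 rc)))) ++ [] by
        simp [catF]]
    rw [ins_mid x _ _
        (fun y hy => by
          simp only [List.mem_append] at hy
          rcases hy with hy | hy | hy | hy | hy <;> (have := mem_Fs hy; omega))
        (fun y hy => by simp at hy)]
    simp [catF, Fs_append_one, hk]

theorem sorted_eq_catF (rc : List (String × List String)) :
    PySem.List.sorted rc keyA true = catF rc := by
  rw [PySem.List.sorted_rev_eq_foldl_insertBy]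
  induction rc using List.reverseRecOn with
  | nil => simp [catF, Fs]
  | append_singleton rc x ih =>
    rw [List.foldl_append, List.foldl_cons, List.foldl_nil, ih, ins_catF]

theorem modify0 (f : List String → List String) (x0 x1 x2 x3 x4 : List String) :
    List.modify [x0, x1, x2, x3, x4] 0 f = [f x0, x1, x2, x3, x4] := rfl
theorem modify1 (f : List String → List String) (x0 x1 x2 x3 x4 : List String) :
    List.modify [x0, x1, x2, x3, x4] 1 f = [x0, f x1, x2, x3, x4] := rfl
theorem modify2 (f : List String → List String) (x0 x1 x2 x3 x4 : List String) :
    List.modify [x0, x1, x2, x3, x4] 2 f = [x0, x1, f x2, x3, x4] := rfl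
theorem modify3 (f : List String → List String) (x0 x1 x2 x3 x4 : List String) :
    List.modify [x0, x1, x2, x3, x4] 3 f = [x0, x1, x2, f x3, x4] := rfl
theorem modify4 (f : List String → List String) (x0 x1 x2 x3 x4 : List String) :
    List.modify [x0, x1, x2, x3, x4] 4 f = [x0, x1, x2, x3, f x4] := rfl

theorem bucket_fold (rc : List (String × List String))
    (h : ∀ p ∈ rc, p.2 ≠ []) (b0 b1 b2 b3 b4 : List String) :
    rc.foldl
      (fun bs p =>
        let best := bestB p.2
        bs.modify best.2.toNat (fun b => b ++ [p.1 ++ " (" ++ best.1 ++ " priority)"]))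
      [b0, b1, b2, b3, b4]
    = [b0 ++ (Fs 0 rc).map fmt, b1 ++ (Fs 1 rc).map fmt, b2 ++ (Fs 2 rc).map fmt,
       b3 ++ (Fs 3 rc).map fmt, b4 ++ (Fs 4 rc).map fmt] := by
  induction rc generalizing b0 b1 b2 b3 b4 with
  | nil => simp [Fs]
  | cons p rc ih =>
    obtain ⟨c, levels⟩ := p
    cases levels with
    | nil => exact absurd rfl (h (c, []) (by simp))
    | cons l t =>
      have hkey := keyA_eq l t c
      have hfmt : fmt (c, l :: t) = c ++ " (" ++ maxFold t l ++ " priority)" := by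
        simp [fmt, max?_cons_eq]
      have hb := keyA_bound (c, l :: t)
      have hrest : ∀ q ∈ rc, q.2 ≠ [] := fun q hq => h q (by simp [hq])
      have hFs : ∀ s : Int, Fs s ((c, l :: t) :: rc)
          = (if keyA (c, l :: t) = s then [(c, l :: t)] else []) ++ Fs s rc := by
        intro s
        simp only [Fs, List.filter_cons]
        split <;> simp_all
      have hk : keyA (c, l :: t) = 4 ∨ keyA (c, l :: t) = 3 ∨ keyA (c, l :: t) = 2 ∨
          keyA (c, l :: t) = 1 ∨ keyA (c, l :: t) = 0 := by omega
      simp only [List.foldl_cons, bestB_eq, ← hkey]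
      rcases hk with hk | hk | hk | hk | hk
      · rw [hk]
        simp only [show ((4 : Int)).toNat = 4 from rfl, modify4]
        rw [ih hrest]
        simp only [hFs, hk]
        simp [hfmt, List.append_assoc]
      · rw [hk]
        simp only [show ((3 : Int)).toNat = 3 from rfl, modify3]
        rw [ih hrest]
        simp only [hFs, hk]
        simp [hfmt, List.append_assoc]
      · rw [hk]
        simp only [show ((2 : Int)).toNat = 2 from rfl, modify2]
        rw [ih hrest]
        simp only [hFs, hk]
        simp [hfmt, List.append_assoc]
      · rw [hk]
        simp only [show ((1 : Int)).toNat = 1 from rfl, modify1]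
        rw [ih hrest]
        simp only [hFs, hk]
        simp [hfmt, List.append_assoc]
      · rw [hk]
        simp only [show ((0 : Int)).toNat = 0 from rfl, modify0]
        rw [ih hrest]
        simp only [hFs, hk]
        simp [hfmt, List.append_assoc]

-- ===== VERDICT (by name: the statement is the Claim_ definition above) =====
theorem prioritize_risk_mitigation_py_spec : Claim_equal_prioritize_risk_mitigation_py := by
  intro rc _ hpre
  show prioritize_risk_mitigation_py rc = prioritize_risk_mitigation_py_alt rc
  have hA : prioritize_risk_mitigation_py rc = ((catF rc).take 5).map fmt := by
    simp only [prioritize_risk_mitigation_py, sorted_eq_catF]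
    rw [PySem.List.slice_to _ (by norm_num)]
    rw [PySem.List.foldl_append_singleton_eq_map]
    rfl
  have hB : prioritize_risk_mitigation_py_alt rc
      = (((Fs 4 rc).map fmt ++ ((Fs 3 rc).map fmt ++ ((Fs 2 rc).map fmt ++ ((Fs 1 rc).map fmt
          ++ (Fs 0 rc).map fmt))))).take 5 := by
    simp only [prioritize_risk_mitigation_py_alt]
    rw [bucket_fold rc hpre]
    simp
  rw [hA, hB, List.map_take]
  congr 1
  simp [catF, List.map_append]
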